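-- pv_equiv track=rewrite | github.com/maxtaillebois/veille-ush-presse | generate_pdf.py | _remove_toc_blocks
-- ===== SOURCE A (Python) =====
-- def _remove_toc_blocks(blocks):
--     """
--     Supprime les blocs de type 'sommaire' : quand 2+ intertitres se suivent
--     sans paragraphe entre eux, c'est le sommaire de l'article web.
--     On les retire car les vrais intertitres apparaîtront plus loin avec leur contenu.
--     """
--     if len(blocks) <= 2:
--         return blocks
--
--     # Identifier les groupes d'intertitres consécutifs
--     to_remove = set()
--     i = 0
--     while i < len(blocks):
--         if blocks[i]['type'] == 'subtitle':
--             # Compter combien d'intertitres se suivent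
--             j = i
--             while j < len(blocks) and blocks[j]['type'] == 'subtitle':
--                 j += 1
--             consecutive = j - i
--             # 2+ intertitres consécutifs = sommaire → supprimer
--             if consecutive >= 2:
--                 for k in range(i, j):
--                     to_remove.add(k)
--             i = j
--         else:
--             i += 1
--
--     return [b for idx, b in enumerate(blocks) if idx not in to_remove]
-- ===== SOURCE B (Python) =====
-- def _remove_toc_blocks(blocks):
--     """Drop each subtitle block that has an adjacent subtitle block (a TOC run)."""
--     if len(blocks) <= 2:
--         return blocks
--     sub = [b['type'] == 'subtitle' for b in blocks]
--     prev = [False] + sub[:-1]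
--     nxt = sub[1:] + [False]
--     return [b for b, s, p, q in zip(blocks, sub, prev, nxt)
--             if not (s and (p or q))]
-- ===== Notes on version B (the rewrite author's own statement) =====
-- stated objective: alternative
-- what changed: Replaced run detection (index-scanning while loop measuring consecutive-subtitle run lengths and collecting a removal-index set) by a per-element local criterion: a block is dropped iff it is a subtitle and an adjacent block is also a subtitle, tested via shifted boolean mask lists zipped with the blocks.
import Mathlib
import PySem

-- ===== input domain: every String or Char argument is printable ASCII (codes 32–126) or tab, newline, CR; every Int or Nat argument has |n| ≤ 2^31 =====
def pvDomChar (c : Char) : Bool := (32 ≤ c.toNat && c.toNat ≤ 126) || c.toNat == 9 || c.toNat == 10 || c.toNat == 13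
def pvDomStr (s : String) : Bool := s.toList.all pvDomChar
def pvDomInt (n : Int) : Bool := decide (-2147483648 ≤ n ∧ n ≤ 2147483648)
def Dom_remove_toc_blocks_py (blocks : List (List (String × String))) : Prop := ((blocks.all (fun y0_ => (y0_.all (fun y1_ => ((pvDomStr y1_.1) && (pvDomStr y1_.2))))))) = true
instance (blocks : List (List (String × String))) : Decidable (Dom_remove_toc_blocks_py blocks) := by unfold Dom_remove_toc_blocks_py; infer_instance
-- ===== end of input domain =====

-- B replaces A's run detection (index-scanning while loop + removal-index set + enumerate/filter
-- pass) by a per-element criterion: a subtitle block is dropped iff an adjacent block is also a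
-- subtitle, tested via shifted boolean mask lists zipped with the blocks (return value only).

-- shared accessor: b['type']  (total via getD ""; the default is reached only outside Pre_,
-- which requires the 'type' key to be present)
def pvBlockType (b : List (String × String)) : String :=
  (PySem.Dict.get? (PySem.Dict.mk b) "type").getD ""

def pvB_isSub (b : List (String × String)) : Bool := pvBlockType b == "subtitle"

-- ===== PORT A =====
-- inner while loop: j scanning forward over consecutive 'subtitle' blocks
def pvA_scan (blocks : List (List (String × String))) (j : Nat) : Nat :=
  if h : j < blocks.length then
    if pvBlockType blocks[j] = "subtitle" then pvA_scan blocks (j + 1) else j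
  else j
termination_by blocks.length - j
decreasing_by omega

-- j ≤ scan j (termination helper for the outer loop)
theorem pvA_scan_ge (blocks : List (List (String × String))) (j : Nat) :
    j ≤ pvA_scan blocks j := by
  rw [pvA_scan]
  split
  · split
    · have := pvA_scan_ge blocks (j + 1); omega
    · exact le_refl j
  · exact le_refl j
termination_by blocks.length - j
decreasing_by omega

theorem pvA_scan_gt (blocks : List (List (String × String))) (i : Nat)
    (h : i < blocks.length) (hs : pvBlockType blocks[i] = "subtitle") :
    i < pvA_scan blocks i := by
  rw [pvA_scan, dif_pos h, if_pos hs]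
  have := pvA_scan_ge blocks (i + 1); omega

-- outer while loop: i, to_remove
def pvA_loop (blocks : List (List (String × String))) (i : Nat) (s : PySem.Set Int) :
    PySem.Set Int :=
  if h : i < blocks.length then
    if hs : pvBlockType blocks[i] = "subtitle" then
      let j := pvA_scan blocks i
      let s' := if 2 ≤ j - i then (PySem.List.pyRange (i : Int) (j : Int) 1).foldl PySem.Set.add s else s
      pvA_loop blocks j s'
    else pvA_loop blocks (i + 1) s
  else s
termination_by blocks.length - i
decreasing_by
  · have := pvA_scan_gt blocks i h hs; omega
  · omega

def remove_toc_blocks_py (blocks : List (List (String × String))) :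
    List (List (String × String)) :=
  if blocks.length ≤ 2 then blocks
  else
    let toRemove := pvA_loop blocks 0 PySem.Set.empty
    ((PySem.List.enumerate blocks 0).filter
        (fun p => !(PySem.Set.contains toRemove p.1))).map (fun p => p.2)

-- ===== PORT B =====
-- sub = [b['type'] == 'subtitle' for b in blocks]; prev = [False] + sub[:-1]; nxt = sub[1:] + [False];
-- keep b unless s and (p or q), over zip(blocks, sub, prev, nxt)
def remove_toc_blocks_py_alt (blocks : List (List (String × String))) :
    List (List (String × String)) :=
  if blocks.length ≤ 2 then blocks
  else
    let sub := blocks.map pvB_isSub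
    let prev := false :: sub.dropLast
    let nxt := sub.tail ++ [false]
    ((blocks.zip (sub.zip (prev.zip nxt))).filter
        (fun q => !(q.2.1 && (q.2.2.1 || q.2.2.2)))).map (fun q => q.1)

-- ===== PRECONDITION & SPEC =====
-- Pre_ excludes only the inputs where A raises: with more than 2 blocks, every block dict
-- must carry the 'type' key (otherwise blocks[i]['type'] is a KeyError).
def Pre_remove_toc_blocks_py (blocks : List (List (String × String))) : Prop :=
  blocks.length ≤ 2 ∨ ∀ b ∈ blocks, (PySem.Dict.get? (PySem.Dict.mk b) "type").isSome = true

instance (blocks : List (List (String × String))) : Decidable (Pre_remove_toc_blocks_py blocks) := by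
  unfold Pre_remove_toc_blocks_py; infer_instance

def pvWitness_remove_toc_blocks_py : (List (List (String × String))) :=
  [[("type", "subtitle")], [("type", "p")], [("type", "subtitle")]]

def Spec_remove_toc_blocks_py (blocks : List (List (String × String)))
    (out : List (List (String × String))) : Prop := out = remove_toc_blocks_py_alt blocks
instance (blocks : List (List (String × String))) (out : List (List (String × String))) :
    Decidable (Spec_remove_toc_blocks_py blocks out) := by
  unfold Spec_remove_toc_blocks_py; infer_instance

-- ===== CLAIM (what is proved, stated in full; the proofs are below) =====
def Claim_equal_remove_toc_blocks_py : Prop :=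
  ∀ (blocks : List (List (String × String))), Dom_remove_toc_blocks_py blocks →
    Pre_remove_toc_blocks_py blocks →
    Spec_remove_toc_blocks_py blocks (remove_toc_blocks_py blocks)

-- ===== LEMMAS AND PROOFS =====

-- the set of indices A's loop removes, computed structurally over the suffix
def pvBad : List (List (String × String)) → Int → List Int
  | [], _ => []
  | b :: rest, i =>
    if pvB_isSub b then
      let c : Int := 1 + (rest.takeWhile pvB_isSub).length
      (if 2 ≤ c then PySem.List.pyRange i (i + c) 1 else []) ++
        pvBad (rest.dropWhile pvB_isSub) (i + c)
    else pvBad rest (i + 1)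
termination_by xs _ => xs.length
decreasing_by
  · simp only [List.length_cons]
    exact Nat.lt_succ_of_le (List.length_dropWhile_le _ rest)
  · simp only [List.length_cons]; omega

-- is position k of xs a subtitle block (false out of range)
def pvSubAt (xs : List (List (String × String))) (k : Nat) : Bool :=
  ((xs[k]?).map pvB_isSub).getD false

-- B's per-element criterion, as an index predicate over the whole list
def pvAdj (xs : List (List (String × String))) (k : Nat) : Bool :=
  pvSubAt xs k && ((decide (0 < k) && pvSubAt xs (k - 1)) || pvSubAt xs (k + 1))

-- common recursive form: prev-subtitle flag + mask suffix + block suffix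
def pvKeepRec : Bool → List Bool → List (List (String × String)) → List (List (String × String))
  | p, s :: srest, b :: brest =>
      (if s && (p || srest.headD false) then [] else [b]) ++ pvKeepRec s srest brest
  | _, _, _ => []

theorem pv_dropWhile_eq_drop {a : Type} (p : a → Bool) (l : List a) :
    l.dropWhile p = l.drop (l.takeWhile p).length := by
  induction l with
  | nil => rfl
  | cons a t ih => by_cases h : p a <;> simp [h, ih]

theorem pvBad_ge (xs : List (List (String × String))) (i x : Int)
    (hx : x ∈ pvBad xs i) : i ≤ x := by
  induction xs, i using pvBad.induct with
  | case1 => simp [pvBad] at hx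
  | case2 b rest i hb c ih =>
    rw [pvBad, if_pos hb] at hx
    rcases List.mem_append.mp hx with h | h
    · split at h
      · exact (PySem.List.mem_pyRange_one.mp h).1
      · simp at h
    · have := ih h
      have : (0:Int) ≤ ((rest.takeWhile pvB_isSub).length : Int) := by positivity
      omega
  | case3 b rest i hb ih =>
    rw [pvBad, if_neg hb] at hx
    have := ih hx; omega

theorem pvA_scan_eq (blocks : List (List (String × String))) (j : Nat) :
    pvA_scan blocks j = j + ((blocks.drop j).takeWhile pvB_isSub).length := by
  induction j using pvA_scan.induct blocks with
  | case1 j h hs ih =>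
    rw [pvA_scan, dif_pos h, if_pos hs]
    rw [List.drop_eq_getElem_cons h, List.takeWhile_cons]
    have hb : pvB_isSub blocks[j] = true := by simp [pvB_isSub, hs]
    rw [hb]
    simp only [if_true, List.length_cons]
    omega
  | case2 j h hs =>
    rw [pvA_scan, dif_pos h, if_neg hs]
    rw [List.drop_eq_getElem_cons h, List.takeWhile_cons]
    have hb : pvB_isSub blocks[j] = false := by simp [pvB_isSub, hs]
    rw [hb]
    simp
  | case3 j h =>
    rw [pvA_scan, dif_neg h]
    rw [List.drop_eq_nil_of_le (by omega)]
    simp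

theorem pv_mem_foldl_add (l : List Int) (s : PySem.Set Int) (x : Int) :
    x ∈ l.foldl PySem.Set.add s ↔ x ∈ s ∨ x ∈ l := by
  induction l generalizing s with
  | nil => simp
  | cons a t ih =>
    simp only [List.foldl_cons, ih, PySem.Set.mem_add, List.mem_cons]
    tauto

theorem pvA_loop_mem (blocks : List (List (String × String))) (i : Nat)
    (s : PySem.Set Int) (x : Int) :
    x ∈ pvA_loop blocks i s ↔ x ∈ s ∨ x ∈ pvBad (blocks.drop i) (i : Int) := by
  induction i, s using pvA_loop.induct blocks with
  | case1 i s h hs j s' ih =>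
    rw [pvA_loop, dif_pos h, dif_pos hs]
    show x ∈ pvA_loop blocks j s' ↔ _
    rw [ih]
    have hcons := List.drop_eq_getElem_cons h
    have hb : pvB_isSub blocks[i] = true := by simp [pvB_isSub, hs]
    set tl := ((blocks.drop (i + 1)).takeWhile pvB_isSub).length with htl
    have htake : (blocks.drop i).takeWhile pvB_isSub
        = blocks[i] :: (blocks.drop (i + 1)).takeWhile pvB_isSub := by
      rw [hcons, List.takeWhile_cons, hb]; simp
    have hj : j = i + (1 + tl) := by
      have hs' := pvA_scan_eq blocks i
      rw [htake] at hs'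
      simp only [List.length_cons] at hs'
      show pvA_scan blocks i = _
      omega
    have hbad : pvBad (blocks.drop i) (i : Int)
        = (if 2 ≤ (1 + tl : Int) then PySem.List.pyRange i (i + (1 + tl)) 1 else []) ++
            pvBad (blocks.drop j) ((i : Int) + (1 + tl)) := by
      rw [hcons, pvBad, if_pos hb]
      have hdw : (blocks.drop (i+1)).dropWhile pvB_isSub = blocks.drop j := by
        rw [pv_dropWhile_eq_drop, List.drop_drop, ← htl]
        congr 1; omega
      rw [hdw]
    rw [hbad]
    have hs'val : (x ∈ s') ↔ (x ∈ s ∨ (2 ≤ j - i ∧ x ∈ PySem.List.pyRange (i:Int) (j:Int) 1)) := by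
      show x ∈ (if 2 ≤ j - i then (PySem.List.pyRange (i : Int) (j : Int) 1).foldl PySem.Set.add s else s) ↔ _
      split
      · rw [pv_mem_foldl_add]; tauto
      · tauto
    rw [hs'val]
    have hcast : ((j : Nat) : Int) = (i : Int) + (1 + tl) := by push_cast [hj]; ring
    have hcond : (2 ≤ j - i) ↔ (2 ≤ (1 + tl : Int)) := by omega
    rw [List.mem_append]
    constructor
    · rintro (⟨hx | ⟨hc, hr⟩⟩ | hx)
      · exact Or.inl hx
      · refine Or.inr (Or.inl ?_)
        rw [if_pos (hcond.mp hc), ← hcast]; exact hr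
      · rw [← hcast]; exact Or.inr (Or.inr hx)
    · rintro (hx | hr | hx)
      · exact Or.inl (Or.inl hx)
      · split at hr
        · rename_i hc
          exact Or.inl (Or.inr ⟨hcond.mpr hc, by rw [hcast]; exact hr⟩)
        · simp at hr
      · rw [hcast]; exact Or.inr hx
  | case2 i s h hs ih =>
    rw [pvA_loop, dif_pos h, dif_neg hs]
    rw [ih]
    rw [List.drop_eq_getElem_cons h, pvBad]
    have hb : pvB_isSub blocks[i] = false := by simp [pvB_isSub, hs]
    rw [if_neg (by simp [hb])]
    norm_num
  | case3 i s h =>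
    rw [pvA_loop, dif_neg h]
    rw [List.drop_eq_nil_of_le (by omega)]
    simp [pvBad]

-- head of dropWhile does not satisfy the predicate
theorem pv_head?_dropWhile {a : Type} (p : a → Bool) (l : List a) (x : a)
    (h : (l.dropWhile p).head? = some x) : p x = false := by
  induction l with
  | nil => simp [List.dropWhile] at h
  | cons b t ih =>
    rw [List.dropWhile_cons] at h
    split at h
    · exact ih h
    · rename_i hb
      simp at h
      subst h
      simpa using hb

theorem pvSubAt_cons_succ (b : List (String × String))
    (rest : List (List (String × String))) (k : Nat) :
    pvSubAt (b :: rest) (k + 1) = pvSubAt rest k := by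
  simp [pvSubAt]

theorem pvSubAt_zero (b : List (String × String)) (rest : List (List (String × String))) :
    pvSubAt (b :: rest) 0 = pvB_isSub b := by
  simp [pvSubAt]

-- shift lemma under a non-subtitle head
theorem pvAdj_cons_of_not (b : List (String × String))
    (rest : List (List (String × String))) (k : Nat) (hb : pvB_isSub b = false) :
    pvAdj (b :: rest) (k + 1) = pvAdj rest k := by
  cases k with
  | zero => simp [pvAdj, pvSubAt_cons_succ, pvSubAt_zero, hb]
  | succ k' =>
    simp only [pvAdj, pvSubAt_cons_succ, Nat.succ_sub_one]
    simp

-- positions in a subtitle run are subtitles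
theorem pv_run_sub (b : List (String × String)) (rest : List (List (String × String)))
    (hb : pvB_isSub b = true) (m : Nat)
    (hm : m ≤ (rest.takeWhile pvB_isSub).length) :
    pvSubAt (b :: rest) m = true := by
  cases m with
  | zero => simpa [pvSubAt_zero]
  | succ m' =>
    rw [pvSubAt_cons_succ]
    have hm' : m' < (rest.takeWhile pvB_isSub).length := by omega
    have hrest : rest = rest.takeWhile pvB_isSub ++ rest.dropWhile pvB_isSub :=
      (List.takeWhile_append_dropWhile).symm
    have hget : rest[m']? = (rest.takeWhile pvB_isSub)[m']? := by
      conv_lhs => rw [hrest]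
      exact List.getElem?_append_left hm'
    rw [pvSubAt, hget, List.getElem?_eq_getElem hm']
    have := List.mem_takeWhile_imp (List.getElem_mem hm')
    simpa using this

-- elements past the run shift to the dropWhile suffix
theorem pv_getElem?_past_run (b : List (String × String))
    (rest : List (List (String × String))) (m : Nat)
    (hm : (rest.takeWhile pvB_isSub).length < m) :
    (b :: rest)[m]? = (rest.dropWhile pvB_isSub)[m - 1 - (rest.takeWhile pvB_isSub).length]? := by
  have hrest : rest = rest.takeWhile pvB_isSub ++ rest.dropWhile pvB_isSub :=
    (List.takeWhile_append_dropWhile).symm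
  cases m with
  | zero => omega
  | succ m' =>
    simp only [List.getElem?_cons_succ]
    conv_lhs => rw [hrest]
    rw [List.getElem?_append_right (by omega)]
    congr 1

theorem pvSubAt_past_run (b : List (String × String))
    (rest : List (List (String × String))) (m : Nat)
    (hm : (rest.takeWhile pvB_isSub).length < m) :
    pvSubAt (b :: rest) m
      = pvSubAt (rest.dropWhile pvB_isSub) (m - 1 - (rest.takeWhile pvB_isSub).length) := by
  rw [pvSubAt, pvSubAt, pv_getElem?_past_run b rest m hm]

-- MAIN: membership in A's removal-index list = B's adjacency criterion
theorem pvBad_iff_adj (n : Nat) :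
    ∀ (xs : List (List (String × String))), xs.length ≤ n → ∀ (i k : Nat),
      (((i : Int) + k) ∈ pvBad xs (i : Int) ↔ pvAdj xs k = true) := by
  induction n with
  | zero =>
    intro xs hlen i k
    have : xs = [] := List.length_eq_zero_iff.mp (Nat.le_zero.mp hlen)
    subst this
    simp [pvBad, pvAdj, pvSubAt]
  | succ n ih =>
    intro xs hlen i k
    match xs with
    | [] => simp [pvBad, pvAdj, pvSubAt]
    | b :: rest =>
      simp only [List.length_cons, Nat.succ_le_succ_iff] at hlen
      by_cases hb : pvB_isSub b = true
      · have hbad : pvBad (b :: rest) (i : Int)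
            = (if 2 ≤ (1 + ((rest.takeWhile pvB_isSub).length : Int)) then
                 PySem.List.pyRange i
                   ((i : Int) + (1 + ((rest.takeWhile pvB_isSub).length : Int))) 1
               else []) ++
                pvBad (rest.dropWhile pvB_isSub)
                  ((i : Int) + (1 + ((rest.takeWhile pvB_isSub).length : Int))) := by
          rw [pvBad, if_pos hb]
        rw [hbad, List.mem_append]
        have hdlen : (rest.dropWhile pvB_isSub).length ≤ n := by
          have h1 := List.length_dropWhile_le pvB_isSub rest
          omega
        have hdsub0 : pvSubAt (rest.dropWhile pvB_isSub) 0 = false := by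
          cases hdd : rest.dropWhile pvB_isSub with
          | nil => simp [pvSubAt]
          | cons x d' =>
            have hx : pvB_isSub x = false := by
              apply pv_head?_dropWhile pvB_isSub rest
              rw [hdd]; rfl
            simp [pvSubAt, hx]
        by_cases hk : k < 1 + (rest.takeWhile pvB_isSub).length
        · -- k inside the run
          have hmem : ((i : Int) + k)
              ∈ PySem.List.pyRange (i : Int) ((i : Int) + (1 + ((rest.takeWhile pvB_isSub).length : Int))) 1 := by
            rw [PySem.List.mem_pyRange_one]
            constructor <;> omega
          have hnot : ((i : Int) + k)
              ∉ pvBad (rest.dropWhile pvB_isSub) ((i : Int) + (1 + ((rest.takeWhile pvB_isSub).length : Int))) := by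
            intro hm
            have := pvBad_ge _ _ _ hm
            omega
          have hsubk : pvSubAt (b :: rest) k = true :=
            pv_run_sub b rest hb k (by omega)
          constructor
          · rintro (hm | hm)
            · have h2 : 1 ≤ (rest.takeWhile pvB_isSub).length := by
                split at hm
                · rename_i hcnd; omega
                · simp at hm
              rw [pvAdj, hsubk, Bool.true_and]
              cases k with
              | zero =>
                have h1 : pvSubAt (b :: rest) 1 = true := pv_run_sub b rest hb 1 (by omega)
                simp [h1]
              | succ k' =>
                have h1 : pvSubAt (b :: rest) k' = true := pv_run_sub b rest hb k' (by omega)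
                simp [h1]
            · exact absurd hm hnot
          · intro hadj
            by_cases h2 : 1 ≤ (rest.takeWhile pvB_isSub).length
            · refine Or.inl ?_
              rw [if_pos (by omega)]
              exact hmem
            · exfalso
              have hk0 : k = 0 := by omega
              subst hk0
              rw [pvAdj, hsubk, Bool.true_and] at hadj
              have h1 : pvSubAt (b :: rest) 1 = false := by
                rw [pvSubAt_past_run b rest 1 (by omega)]
                have he : 1 - 1 - (rest.takeWhile pvB_isSub).length = 0 := by omega
                rw [he]
                exact hdsub0
              simp [h1] at hadj
        · -- k past the run
          rw [Nat.not_lt] at hk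
          have hnotr : ((i : Int) + k) ∉
              (if 2 ≤ (1 + ((rest.takeWhile pvB_isSub).length : Int)) then
                 PySem.List.pyRange i ((i : Int) + (1 + ((rest.takeWhile pvB_isSub).length : Int))) 1 else []) := by
            split
            · intro hm
              have := (PySem.List.mem_pyRange_one.mp hm).2
              omega
            · simp
          have hlhs : (((i : Int) + k)
                ∈ pvBad (rest.dropWhile pvB_isSub) ((i : Int) + (1 + ((rest.takeWhile pvB_isSub).length : Int))))
              ↔ pvAdj (rest.dropWhile pvB_isSub) (k - (1 + (rest.takeWhile pvB_isSub).length)) = true := by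
            have hcast : ((i : Int) + (1 + ((rest.takeWhile pvB_isSub).length : Int))) = (((i + (1 + (rest.takeWhile pvB_isSub).length) : Nat)) : Int) := by
              omega
            have hcast2 : ((i : Int) + (k : Int))
                = (((i + (1 + (rest.takeWhile pvB_isSub).length) : Nat) : Int) + ((k - (1 + (rest.takeWhile pvB_isSub).length) : Nat) : Int)) := by
              omega
            rw [hcast, hcast2]
            exact ih (rest.dropWhile pvB_isSub) hdlen (i + (1 + (rest.takeWhile pvB_isSub).length)) (k - (1 + (rest.takeWhile pvB_isSub).length))
          have hshift : pvAdj (b :: rest) k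
              = pvAdj (rest.dropWhile pvB_isSub) (k - (1 + (rest.takeWhile pvB_isSub).length)) := by
            by_cases hkc : k = 1 + (rest.takeWhile pvB_isSub).length
            · subst hkc
              have hcur : pvSubAt (b :: rest) (1 + (rest.takeWhile pvB_isSub).length) = false := by
                rw [pvSubAt_past_run b rest (1 + (rest.takeWhile pvB_isSub).length) (by omega)]
                have he : 1 + (rest.takeWhile pvB_isSub).length - 1 - (rest.takeWhile pvB_isSub).length = 0 := by omega
                rw [he]
                exact hdsub0
              have he0 : 1 + (rest.takeWhile pvB_isSub).length - (1 + (rest.takeWhile pvB_isSub).length) = 0 := by omega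
              rw [pvAdj, pvAdj, he0, hcur, hdsub0]
              simp
            · have hkc' : 1 + (rest.takeWhile pvB_isSub).length < k := by omega
              have hcur : pvSubAt (b :: rest) k
                  = pvSubAt (rest.dropWhile pvB_isSub) (k - (1 + (rest.takeWhile pvB_isSub).length)) := by
                rw [pvSubAt_past_run b rest k (by omega)]
                have e : k - 1 - (rest.takeWhile pvB_isSub).length = k - (1 + (rest.takeWhile pvB_isSub).length) := by omega
                rw [e]
              have hprev : pvSubAt (b :: rest) (k - 1)
                  = pvSubAt (rest.dropWhile pvB_isSub) (k - (1 + (rest.takeWhile pvB_isSub).length) - 1) := by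
                rw [pvSubAt_past_run b rest (k - 1) (by omega)]
                have e : k - 1 - 1 - (rest.takeWhile pvB_isSub).length = k - (1 + (rest.takeWhile pvB_isSub).length) - 1 := by
                  omega
                rw [e]
              have hnxt : pvSubAt (b :: rest) (k + 1)
                  = pvSubAt (rest.dropWhile pvB_isSub) (k - (1 + (rest.takeWhile pvB_isSub).length) + 1) := by
                rw [pvSubAt_past_run b rest (k + 1) (by omega)]
                have e : k + 1 - 1 - (rest.takeWhile pvB_isSub).length = k - (1 + (rest.takeWhile pvB_isSub).length) + 1 := by
                  omega
                rw [e]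
              have h0k : decide (0 < k) = true := by simp only [decide_eq_true_eq]; omega
              have h0kc : decide (0 < k - (1 + (rest.takeWhile pvB_isSub).length)) = true := by
                simp only [decide_eq_true_eq]; omega
              rw [pvAdj, pvAdj, hcur, hprev, hnxt, h0k, h0kc]
          constructor
          · rintro (hm | hm)
            · exact absurd hm hnotr
            · rw [hshift]; exact hlhs.mp hm
          · intro h
            rw [hshift] at h
            exact Or.inr (hlhs.mpr h)
      · -- non-subtitle head
        replace hb : pvB_isSub b = false := by simpa using hb
        have hbad : pvBad (b :: rest) (i : Int) = pvBad rest ((i : Int) + 1) := by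
          rw [pvBad, if_neg (by simp [hb])]
        rw [hbad]
        cases k with
        | zero =>
          simp only [Nat.cast_zero, add_zero]
          constructor
          · intro hm
            exact absurd (pvBad_ge rest ((i : Int) + 1) (i : Int) hm) (by omega)
          · intro hadj
            exact absurd hadj (by simp [pvAdj, pvSubAt_zero, hb])
        | succ k' =>
          have hcast : ((i : Int) + ((k' + 1 : Nat) : Int)) = (((i + 1 : Nat) : Int) + (k' : Nat)) := by
            omega
          have h1 : ((i : Int) + 1) = ((i + 1 : Nat) : Int) := by omega
          rw [hcast, h1, ih rest hlen (i + 1) k', pvAdj_cons_of_not b rest k' hb]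

-- headD of a mapped list as a getElem? expression
theorem pv_headD_map (l : List (List (String × String))) :
    (l.map pvB_isSub).headD false = ((l[0]?).map pvB_isSub).getD false := by
  cases l <;> simp

-- A side: the enumerate/filter pass with the pvAdj predicate equals the recursive form
theorem pv_enum_adj (full : List (List (String × String))) :
    ∀ (rest : List (List (String × String))) (off : Nat) (p : Bool),
      rest = full.drop off →
      p = (decide (0 < off) && pvSubAt full (off - 1)) →
      ((PySem.List.enumerate rest (off : Int)).filter
          (fun q => !(pvAdj full q.1.toNat))).map (fun q => q.2)
        = pvKeepRec p (rest.map pvB_isSub) rest := by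
  intro rest
  induction rest with
  | nil => intro off p _ _; simp [PySem.List.enumerate_nil, pvKeepRec]
  | cons b rest' ihr =>
    intro off p hdrop hp
    have h0 : (full.drop off)[0]? = full[off + 0]? := List.getElem?_drop ..
    have hb : full[off]? = some b := by
      have : full[off + 0]? = some b := by rw [← h0, ← hdrop]; rfl
      simpa using this
    have hsub0 : pvSubAt full off = pvB_isSub b := by
      simp [pvSubAt, hb]
    have h1 : (full.drop off)[1]? = full[off + 1]? := List.getElem?_drop ..
    have hsub1 : pvSubAt full (off + 1) = (rest'.map pvB_isSub).headD false := by
      have : full[off + 1]? = rest'[0]? := by rw [← h1, ← hdrop]; rfl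
      rw [pvSubAt, this, pv_headD_map]
    have hdrop' : rest' = full.drop (off + 1) := by
      have ht : (full.drop off).tail = full.drop (off + 1) := List.tail_drop ..
      rw [← ht, ← hdrop]
      rfl
    rw [PySem.List.enumerate_cons]
    have harg : ((off : Int) + 1) = ((off + 1 : Nat) : Int) := by omega
    rw [harg, List.filter_cons]
    have hcnd : pvAdj full (((off : Int), b)).1.toNat
        = (pvB_isSub b && (p || (rest'.map pvB_isSub).headD false)) := by
      show pvAdj full ((off : Int)).toNat = _
      have htn : ((off : Int)).toNat = off := by simp
      rw [htn, pvAdj, hsub0, hsub1, hp]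
    have hih := ihr (off + 1) (pvB_isSub b) hdrop'
      (by
        have e : off + 1 - 1 = off := rfl
        rw [e, ← hsub0]
        simp)
    rw [List.map_cons, pvKeepRec]
    cases hcc : (pvB_isSub b && (p || (rest'.map pvB_isSub).headD false)) with
    | true =>
      simp only [hcnd, hcc, Bool.not_true, Bool.false_eq_true, if_false, if_true,
        List.nil_append]
      exact hih
    | false =>
      simp only [hcnd, hcc, Bool.not_false, if_true, Bool.false_eq_true, if_false,
        List.map_cons, List.singleton_append]
      exact congrArg (List.cons b) hih

-- B side: the zip construction equals the recursive form
theorem pv_zip_keep (xs : List (List (String × String))) :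
    ∀ (p : Bool),
      ((xs.zip ((xs.map pvB_isSub).zip
          ((p :: (xs.map pvB_isSub).dropLast).zip ((xs.map pvB_isSub).tail ++ [false])))).filter
          (fun q => !(q.2.1 && (q.2.2.1 || q.2.2.2)))).map (fun q => q.1)
        = pvKeepRec p (xs.map pvB_isSub) xs := by
  induction xs with
  | nil => intro p; simp [pvKeepRec]
  | cons b rest ihr =>
    intro p
    cases rest with
    | nil =>
      cases hbb : pvB_isSub b <;> cases p <;>
        simp [pvKeepRec, hbb, List.zip, List.zipWith, List.filter]
    | cons c rest' =>
      have hstep : (pvB_isSub b :: List.map pvB_isSub (c :: rest')).dropLast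
          = pvB_isSub b :: (List.map pvB_isSub (c :: rest')).dropLast := by
        simp
      have hnxt : (pvB_isSub b :: List.map pvB_isSub (c :: rest')).tail ++ [false]
          = pvB_isSub c :: ((List.map pvB_isSub (c :: rest')).tail ++ [false]) := by
        simp
      rw [List.map_cons, hstep, hnxt, List.zip_cons_cons, List.zip_cons_cons,
        List.zip_cons_cons, List.filter_cons]
      have hhd : ((c :: rest').map pvB_isSub).headD false = pvB_isSub c := by simp
      rw [pvKeepRec, hhd]
      have hih := ihr (pvB_isSub b)
      cases hcc : (pvB_isSub b && (p || pvB_isSub c)) with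
      | true =>
        simp only [Bool.not_true, Bool.false_eq_true, if_false, if_true,
          List.nil_append]
        exact hih
      | false =>
        simp only [Bool.not_false, if_true, Bool.false_eq_true, if_false,
          List.map_cons, List.singleton_append]
        exact congrArg (List.cons b) hih

-- ===== VERDICT (by name: the statement is the Claim_ definition above) =====
theorem remove_toc_blocks_py_spec : Claim_equal_remove_toc_blocks_py := by
  intro blocks _ _
  unfold Spec_remove_toc_blocks_py remove_toc_blocks_py remove_toc_blocks_py_alt
  by_cases h : blocks.length ≤ 2
  · simp [h]
  · simp only [if_neg h]
    have hcongr : ((PySem.List.enumerate blocks 0).filter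
        (fun p => !(PySem.Set.contains (pvA_loop blocks 0 PySem.Set.empty) p.1))) =
        ((PySem.List.enumerate blocks 0).filter
        (fun q => !(pvAdj blocks q.1.toNat))) := by
      apply List.filter_congr
      intro p hp
      rcases (PySem.List.mem_enumerate_iff _ _ _).mp hp with ⟨k, hk, rfl⟩
      have hmem := pvA_loop_mem blocks 0 PySem.Set.empty ((k : Int))
      simp only [List.drop_zero, Nat.cast_zero] at hmem
      have hbad := pvBad_iff_adj blocks.length blocks (le_refl _) 0 k
      simp only [Nat.cast_zero, zero_add] at hbad
      have hiff : (((k : Int)) ∈ pvA_loop blocks 0 PySem.Set.empty)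
          ↔ pvAdj blocks k = true := by
        rw [hmem, hbad]
        simp [PySem.Set.empty]
      have hcont : PySem.Set.contains (pvA_loop blocks 0 PySem.Set.empty) ((k : Int))
          = pvAdj blocks k := by
        cases hv : pvAdj blocks k with
        | true => exact (PySem.Set.contains_iff _ _).mpr (hiff.mpr hv)
        | false =>
          exact Bool.eq_false_iff.mpr
            (fun hc => by simpa [hv] using hiff.mp ((PySem.Set.contains_iff _ _).mp hc))
      simp only [zero_add]
      have htn : (((k : Int), blocks[k]).1).toNat = k := by simp
      show (!PySem.Set.contains (pvA_loop blocks 0 PySem.Set.empty) ((k : Int)))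
          = (!pvAdj blocks (((k : Int), blocks[k]).1).toNat)
      rw [hcont, htn]
    rw [hcongr]
    have hA := pv_enum_adj blocks blocks 0 false rfl (by simp)
    simp only [Nat.cast_zero] at hA
    rw [hA]
    exact (pv_zip_keep blocks false).symm
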